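-- pv_equiv track=rewrite | github.com/BMariscal/study-notebook | dynamicprogramming/maximum_even_odd_operations.py | getMaximumScore
-- ===== SOURCE A (Python) =====
-- def getMaximumScore(nums):
--
--     preSum = [0] * (len(nums) + 1)
--
--     for i in range(1,len(nums)+1):
--         preSum[i] = preSum[i - 1] + nums[i - 1]
--
--     isOdd = len(nums) % 2 == 1
--
--     dp = [[0 for x in range(len(nums)+1)] for i in range(len(nums)+1)]
--
--     for l in range(0, len(nums)+1):
--         for i in range(0, len(nums)+1):
--           if i + l < (len(nums)):
--             if l == 0:
--                 if isOdd:
--                     dp[i][i] = nums[i]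
--                 else:
--                     dp[i][i] = -nums[i]
--                 continue
--             else:
--                 if isOdd:
--                     dp[i][i + l] = max(dp[i + 1][i + l], dp[i][i + l - 1]) + preSum[i + l + 1] - preSum[i]
--                 else:
--                     dp[i][i + l] = max(dp[i + 1][i + l], dp[i][i + l - 1]) - preSum[i + l + 1] + preSum[i]
--
--
--         isOdd = not isOdd
--     return dp[0][len(nums) - 1]
-- ===== SOURCE B (Python) =====
-- def getMaximumScore(nums):
--     n = len(nums)
--     if n == 0:
--         return 0
--     preSum = [0]
--     for x in nums:
--         preSum.append(preSum[-1] + x)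
--
--     def level(l):
--         sign = 1 if (n - l) % 2 == 1 else -1
--         if l == 0:
--             return [sign * nums[i] for i in range(n)]
--         prev = level(l - 1)
--         return [max(prev[i + 1], prev[i]) + sign * (preSum[i + l + 1] - preSum[i])
--                 for i in range(n - l)]
--
--     return level(n - 1)[0]
-- ===== Notes on version B (the rewrite author's own statement) =====
-- stated objective: faster
-- what changed: Replaces the mutable (n+1)x(n+1) bottom-up DP table (nested index loops with in-place writes) by a recursion over diagonal levels that builds each level's 1-D list from the previous one, using O(n) auxiliary space instead of O(n^2).
import Mathlib
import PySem

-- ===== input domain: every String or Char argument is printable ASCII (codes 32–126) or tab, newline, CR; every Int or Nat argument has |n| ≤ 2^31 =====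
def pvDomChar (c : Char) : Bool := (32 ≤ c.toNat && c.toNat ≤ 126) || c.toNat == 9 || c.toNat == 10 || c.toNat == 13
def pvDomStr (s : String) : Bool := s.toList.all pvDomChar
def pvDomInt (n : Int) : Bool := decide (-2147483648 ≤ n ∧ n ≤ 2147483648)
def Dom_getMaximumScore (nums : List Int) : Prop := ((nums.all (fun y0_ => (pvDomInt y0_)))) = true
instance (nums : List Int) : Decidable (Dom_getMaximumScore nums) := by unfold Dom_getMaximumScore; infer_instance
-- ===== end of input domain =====

-- B replaces A's full (n+1)×(n+1) in-place DP table by a recursion over diagonal levels that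
-- keeps a single 1-D level list at a time (alternative decomposition, O(n) auxiliary space).

-- ===== PORT A =====
-- dp[i][j] read / in-place assignment (all indices produced by A's loops are nonnegative and
-- in range; the final read dp[0][len-1] may use index -1 on empty input, which pyGetD handles
-- Python-exactly)
def pvGet2 (dp : List (List Int)) (i j : Int) : Int :=
  PySem.List.pyGetD (PySem.List.pyGetD dp i []) j 0

def pvSet2 (dp : List (List Int)) (i j : Int) (v : Int) : List (List Int) :=
  PySem.List.pySetD dp i (PySem.List.pySetD (PySem.List.pyGetD dp i []) j v)

def getMaximumScore (nums : List Int) : Int :=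
  let n : Nat := nums.length
  let preSum : List Int :=
    (PySem.List.pyRange 1 (↑n + 1) 1).foldl
      (fun ps i =>
        PySem.List.pySetD ps i
          (PySem.List.pyGetD ps (i - 1) 0 + PySem.List.pyGetD nums (i - 1) 0))
      (List.replicate (n + 1) 0)
  let isOdd : Bool := PySem.Int.mod (↑n) 2 == 1
  let dp0 : List (List Int) :=
    (PySem.List.pyRange 0 (↑n + 1) 1).map
      (fun _ => (PySem.List.pyRange 0 (↑n + 1) 1).map (fun _ => (0 : Int)))
  let res :=
    (PySem.List.pyRange 0 (↑n + 1) 1).foldl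
      (fun (st : List (List Int) × Bool) l =>
        let dp :=
          (PySem.List.pyRange 0 (↑n + 1) 1).foldl
            (fun dp i =>
              if i + l < ↑n then
                if l == 0 then
                  if st.2 then pvSet2 dp i i (PySem.List.pyGetD nums i 0)
                  else pvSet2 dp i i (-(PySem.List.pyGetD nums i 0))
                else
                  if st.2 then
                    pvSet2 dp i (i + l)
                      (max (pvGet2 dp (i + 1) (i + l)) (pvGet2 dp i (i + l - 1)) +
                        PySem.List.pyGetD preSum (i + l + 1) 0 - PySem.List.pyGetD preSum i 0)
                  else
                    pvSet2 dp i (i + l)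
                      (max (pvGet2 dp (i + 1) (i + l)) (pvGet2 dp i (i + l - 1)) -
                        PySem.List.pyGetD preSum (i + l + 1) 0 + PySem.List.pyGetD preSum i 0)
              else dp)
            st.1
        (dp, !st.2))
      (dp0, isOdd)
  pvGet2 res.1 0 (↑n - 1)

-- ===== PORT B =====
-- level l returns the list [value of interval [i, i+l] for i in range(n-l)];
-- indices taken inside the comprehensions are in range, so List.getD is exact.
def pvLevel (nums preSum : List Int) (n : Nat) : Nat → List Int
  | 0 =>
    (List.range n).map (fun i =>
      (if (n - 0) % 2 = 1 then (1 : Int) else -1) * nums.getD i 0)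
  | l + 1 =>
    let prev := pvLevel nums preSum n l
    (List.range (n - (l + 1))).map (fun i =>
      max (prev.getD (i + 1) 0) (prev.getD i 0) +
        (if (n - (l + 1)) % 2 = 1 then (1 : Int) else -1) *
          (preSum.getD (i + (l + 1) + 1) 0 - preSum.getD i 0))

def getMaximumScore_alt (nums : List Int) : Int :=
  let n := nums.length
  if n = 0 then 0
  else
    let preSum := nums.foldl (fun ps x => ps ++ [PySem.List.pyGetD ps (-1) 0 + x]) [0]
    (pvLevel nums preSum n (n - 1)).getD 0 0

-- ===== PRECONDITION & SPEC =====
def Spec_getMaximumScore (nums : List Int) (out : Int) : Prop := out = getMaximumScore_alt nums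
instance (nums : List Int) (out : Int) : Decidable (Spec_getMaximumScore nums out) := by unfold Spec_getMaximumScore; infer_instance

-- ===== CLAIM (what is proved, stated in full; the proofs are below) =====
def Claim_equal_getMaximumScore : Prop := ∀ (nums : List Int), Dom_getMaximumScore nums → Spec_getMaximumScore nums (getMaximumScore nums)

-- ===== LEMMAS AND PROOFS =====

-- pure forms: prefix sums, the sign of level l, and the interval value g i l (score of [i, i+l])
def pvPsum (nums : List Int) (k : Nat) : Int := (nums.take k).sum

def pvSgn (n l : Nat) : Int := if (n - l) % 2 = 1 then 1 else -1

def pvG (nums : List Int) (n : Nat) : Nat → Nat → Int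
  | i, 0 => pvSgn n 0 * nums.getD i 0
  | i, l + 1 =>
    max (pvG nums n (i + 1) l) (pvG nums n i l) +
      pvSgn n (l + 1) * (pvPsum nums (i + l + 2) - pvPsum nums i)

theorem pv_set_map_range {α : Type} (f : Nat → α) (m j : Nat) (v : α) (hj : j < m) :
    (List.map f (List.range m)).set j v
      = (List.range m).map (fun x => if x = j then v else f x) := by
  apply List.ext_getElem
  · simp
  · intro k h1 h2
    simp only [List.length_set, List.length_map, List.length_range] at h1 h2
    simp only [List.getElem_set, List.getElem_map, List.getElem_range]
    by_cases h : k = j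
    · subst h; simp
    · rw [if_neg (fun hh => h hh.symm), if_neg h]

def pvMat (n : Nat) (F : Nat → Nat → Int) : List (List Int) :=
  (List.range (n + 1)).map (fun i => (List.range (n + 1)).map (F i))

theorem pvMat_congr (n : Nat) (F F' : Nat → Nat → Int)
    (h : ∀ i j, i < n + 1 → j < n + 1 → F i j = F' i j) : pvMat n F = pvMat n F' := by
  unfold pvMat
  apply List.map_congr_left
  intro i hi
  apply List.map_congr_left
  intro j hj
  exact h _ _ (List.mem_range.mp hi) (List.mem_range.mp hj)

theorem pvGet2_mat (n : Nat) (F : Nat → Nat → Int) (i j : Nat)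
    (hi : i < n + 1) (hj : j < n + 1) : pvGet2 (pvMat n F) ↑i ↑j = F i j := by
  unfold pvGet2 pvMat
  rw [PySem.List.pyGetD_natCast, PySem.List.pyGetD_natCast,
      PySem.List.getD_map_range _ _ _ _ hi, PySem.List.getD_map_range _ _ _ _ hj]

theorem pvSet2_mat (n : Nat) (F : Nat → Nat → Int) (i j : Nat)
    (hi : i < n + 1) (hj : j < n + 1) (v : Int) :
    pvSet2 (pvMat n F) ↑i ↑j v
      = pvMat n (fun i' j' => if i' = i ∧ j' = j then v else F i' j') := by
  unfold pvSet2 pvMat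
  rw [PySem.List.pyGetD_natCast, PySem.List.getD_map_range _ _ _ _ hi,
      PySem.List.pySetD_natCast, PySem.List.pySetD_natCast,
      pv_set_map_range _ _ _ _ hi, pv_set_map_range _ _ _ _ hj]
  apply List.map_congr_left
  intro i' hi'
  by_cases h : i' = i
  · subst h
    rw [if_pos rfl]
    apply List.map_congr_left
    intro j' _
    by_cases hjj : j' = j
    · subst hjj; simp
    · simp [hjj]
  · rw [if_neg h]
    apply List.map_congr_left
    intro j' _
    simp [h]

theorem pv_preB (xs : List Int) :
    xs.foldl (fun ps x => ps ++ [PySem.List.pyGetD ps (-1) 0 + x]) [0]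
      = (List.range (xs.length + 1)).map (pvPsum xs) := by
  unfold pvPsum
  induction xs using List.reverseRecOn with
  | nil => simp
  | append_singleton ys y ih =>
    rw [List.foldl_append, ih]
    simp only [List.foldl_cons, List.foldl_nil]
    have hlast : PySem.List.pyGetD
        (List.map (fun k => (List.take k ys).sum) (List.range (ys.length + 1))) (-1) 0
        = ys.sum := by
      rw [List.range_succ, List.map_append, List.map_singleton,
        PySem.List.pyGetD_neg_one_append_singleton, List.take_length]
    rw [hlast, List.length_append, List.length_singleton]
    conv_rhs => rw [List.range_succ, List.map_append, List.map_singleton]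
    congr 1
    · apply List.map_congr_left
      intro k hk
      rw [List.take_append_of_le_length (Nat.lt_succ_iff.mp (List.mem_range.mp hk))]
    · have ht : List.take (ys.length + 1) (ys ++ [y]) = ys ++ [y] :=
        List.take_of_length_le (by simp)
      simp [ht, List.sum_append]

theorem pv_level_char (nums : List Int) (n : Nat) :
    ∀ l, l < n →
      pvLevel nums ((List.range (n + 1)).map (pvPsum nums)) n l
        = (List.range (n - l)).map (fun i => pvG nums n i l) := by
  intro l
  induction l with
  | zero =>
    intro _
    simp only [pvLevel, pvG, pvSgn, Nat.sub_zero]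
  | succ l ih =>
    intro hl
    have hl' : l < n := by omega
    simp only [pvLevel]
    rw [ih hl']
    apply List.map_congr_left
    intro i hi
    have hi' : i < n - (l + 1) := List.mem_range.mp hi
    rw [PySem.List.getD_map_range _ _ _ _ (by omega),
        PySem.List.getD_map_range _ _ _ _ (by omega),
        PySem.List.getD_map_range _ _ _ _ (by omega),
        PySem.List.getD_map_range _ _ _ _ (by omega)]
    show _ = pvG nums n i (l + 1)
    simp only [pvG, pvSgn]
    have : i + (l + 1) + 1 = i + l + 2 := by omega
    rw [this]

theorem pv_alt_eq (nums : List Int) (h : nums ≠ []) :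
    getMaximumScore_alt nums = pvG nums nums.length 0 (nums.length - 1) := by
  have hn : nums.length ≠ 0 := by simpa using h
  simp only [getMaximumScore_alt, if_neg hn]
  rw [pv_preB, pv_level_char nums nums.length (nums.length - 1) (by omega)]
  rw [PySem.List.getD_map_range _ _ _ _ (by omega)]

-- A's preSum loop
theorem pv_preA_aux (nums : List Int) (n : Nat) (hn : n = nums.length) :
    ∀ k, k ≤ n →
    (PySem.List.pyRange 1 (↑k + 1) 1).foldl
      (fun ps i => PySem.List.pySetD ps i
        (PySem.List.pyGetD ps (i - 1) 0 + PySem.List.pyGetD nums (i - 1) 0))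
      (List.replicate (n + 1) 0)
      = (List.range (n + 1)).map (fun j => if j ≤ k then pvPsum nums j else 0) := by
  intro k
  induction k with
  | zero =>
    intro _
    rw [show ((0:Nat):Int) + 1 = 1 by norm_num, PySem.List.pyRange_one_eq_nil (le_refl 1)]
    simp only [List.foldl_nil]
    apply List.ext_getElem
    · simp
    · intro m h1 h2
      simp only [List.getElem_replicate, List.getElem_map, List.getElem_range]
      by_cases hm : m = 0
      · subst hm; simp [pvPsum]
      · rw [if_neg (by omega)]
  | succ k ih =>
    intro hk
    have hk' : k ≤ n := by omega
    rw [show ((k+1:Nat):Int) + 1 = ((k:Int) + 1) + 1 by push_cast; ring,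
        PySem.List.pyRange_one_succ_right (by omega), List.foldl_append, ih hk']
    simp only [List.foldl_cons, List.foldl_nil]
    rw [show ((k:Int) + 1 - 1) = ((k:Nat):Int) by ring,
        show ((k:Int) + 1) = ((k+1:Nat):Int) by push_cast; ring]
    rw [PySem.List.pyGetD_natCast, PySem.List.getD_map_range _ _ _ _ (by omega),
        if_pos (le_refl k), PySem.List.pyGetD_natCast, PySem.List.pySetD_natCast,
        pv_set_map_range _ _ _ _ (by omega)]
    apply List.map_congr_left
    intro x hx
    by_cases h : x = k + 1
    · subst h
      rw [if_pos rfl, if_pos (le_refl _)]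
      have hkl : k < nums.length := by omega
      simp only [pvPsum]
      rw [List.take_add_one, List.sum_append]
      simp [List.getD, List.getElem?_eq_getElem hkl]
    · rw [if_neg h]
      by_cases h2 : x ≤ k
      · rw [if_pos h2, if_pos (by omega)]
      · rw [if_neg h2, if_neg (by omega)]

theorem pv_preA (nums : List Int) :
    (PySem.List.pyRange 1 (↑nums.length + 1) 1).foldl
      (fun ps i => PySem.List.pySetD ps i
        (PySem.List.pyGetD ps (i - 1) 0 + PySem.List.pyGetD nums (i - 1) 0))
      (List.replicate (nums.length + 1) 0)
      = (List.range (nums.length + 1)).map (pvPsum nums) := by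
  rw [pv_preA_aux nums nums.length rfl nums.length (le_refl _)]
  apply List.map_congr_left
  intro x hx
  have := List.mem_range.mp hx
  rw [if_pos (by omega : x ≤ nums.length)]
def pvCondIn (nums : List Int) (n l I i j : Nat) : Int :=
  if j < n ∧ i ≤ j ∧ (j - i < l ∨ (j - i = l ∧ i < I)) then pvG nums n i (j - i) else 0

theorem pv_inner (nums : List Int) (n : Nat) (hn : n = nums.length)
    (l : Nat) (b : Bool) (hb : b = ((n + l) % 2 == 1)) :
    ∀ I, I ≤ n + 1 →
    (PySem.List.pyRange 0 (↑I) 1).foldl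
      (fun dp i =>
        if i + ↑l < (↑n : Int) then
          if (↑l : Int) == 0 then
            if b then pvSet2 dp i i (PySem.List.pyGetD nums i 0)
            else pvSet2 dp i i (-(PySem.List.pyGetD nums i 0))
          else
            if b then
              pvSet2 dp i (i + ↑l)
                (max (pvGet2 dp (i + 1) (i + ↑l)) (pvGet2 dp i (i + ↑l - 1)) +
                  PySem.List.pyGetD ((List.range (n + 1)).map (pvPsum nums)) (i + ↑l + 1) 0 -
                  PySem.List.pyGetD ((List.range (n + 1)).map (pvPsum nums)) i 0)
            else
              pvSet2 dp i (i + ↑l)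
                (max (pvGet2 dp (i + 1) (i + ↑l)) (pvGet2 dp i (i + ↑l - 1)) -
                  PySem.List.pyGetD ((List.range (n + 1)).map (pvPsum nums)) (i + ↑l + 1) 0 +
                  PySem.List.pyGetD ((List.range (n + 1)).map (pvPsum nums)) i 0)
        else dp)
      (pvMat n (pvCondIn nums n l 0))
      = pvMat n (pvCondIn nums n l I) := by
  intro I
  induction I with
  | zero =>
    intro _
    rw [show ((0:Nat):Int) = 0 from rfl, PySem.List.pyRange_one_eq_nil (le_refl 0)]
    rw [List.foldl_nil]
  | succ I ih =>
    intro hI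
    have hI' : I ≤ n + 1 := by omega
    rw [show ((I+1:Nat):Int) = ((I:Int)) + 1 by push_cast; ring,
        PySem.List.pyRange_one_succ_right (by omega), List.foldl_append, ih hI']
    simp only [List.foldl_cons, List.foldl_nil]
    by_cases hcase : I + l < n
    · rw [if_pos (by exact_mod_cast hcase : ((I:Int)) + ↑l < (↑n : Int))]
      by_cases hl0 : l = 0
      · subst hl0
        rw [if_pos (by norm_num)]
        have hval : (if b then pvSet2 (pvMat n (pvCondIn nums n 0 I)) ↑I ↑I (PySem.List.pyGetD nums ↑I 0)
            else pvSet2 (pvMat n (pvCondIn nums n 0 I)) ↑I ↑I (-(PySem.List.pyGetD nums ↑I 0)))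
            = pvSet2 (pvMat n (pvCondIn nums n 0 I)) ↑I ↑I (pvG nums n I 0) := by
          rw [PySem.List.pyGetD_natCast]
          rcases Nat.mod_two_eq_zero_or_one n with hpar | hpar
          · rw [hb, if_neg (by simp [hpar])]
            simp only [pvG, pvSgn, Nat.sub_zero, hpar]
            norm_num
          · rw [hb, if_pos (by simp [hpar])]
            simp only [pvG, pvSgn, Nat.sub_zero, hpar]
            norm_num
        rw [hval, pvSet2_mat n _ I I (by omega) (by omega)]
        apply pvMat_congr
        intro i j hi hj
        unfold pvCondIn
        by_cases hij : i = I ∧ j = I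
        · obtain ⟨h1, h2⟩ := hij
          subst h1; subst h2
          rw [if_pos ⟨rfl, rfl⟩, if_pos (by omega), Nat.sub_self]
        · rw [if_neg hij]
          by_cases hc : j < n ∧ i ≤ j ∧ (j - i < 0 ∨ (j - i = 0 ∧ i < I))
          · rw [if_pos hc, if_pos (by omega)]
          · rw [if_neg hc, if_neg (by omega)]
      · rw [if_neg (by simpa using (by exact_mod_cast hl0 : ¬ ((l:Int)) = 0))]
        have e1 : ((I:Int)) + 1 = ((I+1 : Nat) : Int) := by push_cast; ring
        have e2 : ((I:Int)) + ↑l = ((I+l : Nat) : Int) := by push_cast; ring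
        have e3 : ((I:Int)) + ↑l - 1 = ((I+l-1 : Nat) : Int) := by omega
        have e4 : ((I:Int)) + ↑l + 1 = ((I+l+1 : Nat) : Int) := by push_cast; ring
        rw [e3, e4, e2, e1]
        rw [pvGet2_mat n _ (I+1) (I+l) (by omega) (by omega),
            pvGet2_mat n _ I (I+l-1) (by omega) (by omega),
            PySem.List.pyGetD_natCast, PySem.List.getD_map_range _ _ _ _ (by omega),
            PySem.List.pyGetD_natCast, PySem.List.getD_map_range _ _ _ _ (by omega)]
        have hc1 : pvCondIn nums n l I (I+1) (I+l) = pvG nums n (I+1) (l-1) := by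
          unfold pvCondIn
          rw [if_pos (by omega), show I + l - (I + 1) = l - 1 from by omega]
        have hc2 : pvCondIn nums n l I I (I+l-1) = pvG nums n I (l-1) := by
          unfold pvCondIn
          rw [if_pos (by omega), show I + l - 1 - I = l - 1 from by omega]
        rw [hc1, hc2]
        have hgval : pvG nums n I l =
            max (pvG nums n (I+1) (l-1)) (pvG nums n I (l-1)) +
              pvSgn n l * (pvPsum nums (I+l+1) - pvPsum nums I) := by
          obtain ⟨l', rfl⟩ : ∃ l', l = l' + 1 := ⟨l - 1, by omega⟩
          simp only [pvG, Nat.add_sub_cancel]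
          rw [show I + (l' + 1) + 1 = I + l' + 2 from by omega]
        have hval2 : (if b = true then
              pvSet2 (pvMat n (pvCondIn nums n l I)) (↑I) (↑(I + l))
                (max (pvG nums n (I+1) (l-1)) (pvG nums n I (l-1)) + pvPsum nums (I+l+1) - pvPsum nums I)
            else
              pvSet2 (pvMat n (pvCondIn nums n l I)) (↑I) (↑(I + l))
                (max (pvG nums n (I+1) (l-1)) (pvG nums n I (l-1)) - pvPsum nums (I+l+1) + pvPsum nums I))
            = pvSet2 (pvMat n (pvCondIn nums n l I)) (↑I) (↑(I + l)) (pvG nums n I l) := by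
          rw [hgval]
          rcases Nat.mod_two_eq_zero_or_one (n + l) with hp | hp
          · rw [hb, if_neg (by simp [hp])]
            unfold pvSgn
            rw [if_neg (by omega)]
            congr 1
            ring
          · rw [hb, if_pos (by simp [hp])]
            unfold pvSgn
            rw [if_pos (by omega)]
            congr 1
            ring
        rw [hval2, pvSet2_mat n _ I (I+l) (by omega) (by omega)]
        apply pvMat_congr
        intro i j hi hj
        unfold pvCondIn
        by_cases hij : i = I ∧ j = I + l
        · obtain ⟨h1, h2⟩ := hij
          subst h1; subst h2
          rw [if_pos ⟨rfl, rfl⟩, if_pos (by omega)]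
          congr 1
          omega
        · rw [if_neg hij]
          by_cases hc : j < n ∧ i ≤ j ∧ (j - i < l ∨ (j - i = l ∧ i < I))
          · rw [if_pos hc, if_pos (by omega)]
          · rw [if_neg hc, if_neg (by omega)]
    · rw [if_neg (by exact_mod_cast hcase : ¬ ((I:Int)) + ↑l < (↑n : Int))]
      apply pvMat_congr
      intro i j hi hj
      unfold pvCondIn
      by_cases hc : j < n ∧ i ≤ j ∧ (j - i < l ∨ (j - i = l ∧ i < I))
      · rw [if_pos hc, if_pos (by omega)]
      · rw [if_neg hc, if_neg (by omega)]

theorem pv_parity_init (n : Nat) : (PySem.Int.mod (↑n) 2 == 1) = ((n % 2) == 1) := by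
  rw [show (2:Int) = ((2:Nat):Int) from rfl, PySem.Int.mod_natCast]
  rcases Nat.mod_two_eq_zero_or_one n with h | h <;> simp [h]

theorem pv_parity_flip (m : Nat) : (!((m % 2) == 1)) = (((m + 1) % 2) == 1) := by
  rcases Nat.mod_two_eq_zero_or_one m with h | h <;> simp [h, Nat.add_mod]

theorem pv_dp0 (nums : List Int) (n : Nat) :
    (PySem.List.pyRange 0 (↑n + 1) 1).map
      (fun _ => (PySem.List.pyRange 0 (↑n + 1) 1).map (fun _ => (0 : Int)))
      = pvMat n (pvCondIn nums n 0 0) := by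
  have hlen : (PySem.List.pyRange 0 (↑n + 1) 1).length = n + 1 := by
    rw [PySem.List.length_pyRange_one]; omega
  have hrow : (PySem.List.pyRange 0 (↑n + 1) 1).map (fun _ => (0 : Int))
      = List.replicate (n + 1) 0 := by rw [List.map_const', hlen]
  rw [hrow, List.map_const', hlen]
  unfold pvMat
  apply List.ext_getElem
  · simp
  · intro k h1 h2
    simp only [List.getElem_replicate, List.getElem_map, List.getElem_range]
    apply List.ext_getElem
    · simp
    · intro m h3 h4
      simp only [List.getElem_replicate, List.getElem_map, List.getElem_range]
      unfold pvCondIn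
      rw [if_neg (by omega)]

theorem pv_outer (nums : List Int) (n : Nat) (hn : n = nums.length) :
    ∀ L : Nat,
    (PySem.List.pyRange 0 (↑L) 1).foldl
      (fun (st : List (List Int) × Bool) l =>
        ((PySem.List.pyRange 0 (↑n + 1) 1).foldl
            (fun dp i =>
              if i + l < (↑n : Int) then
                if l == 0 then
                  if st.2 then pvSet2 dp i i (PySem.List.pyGetD nums i 0)
                  else pvSet2 dp i i (-(PySem.List.pyGetD nums i 0))
                else
                  if st.2 then
                    pvSet2 dp i (i + l)
                      (max (pvGet2 dp (i + 1) (i + l)) (pvGet2 dp i (i + l - 1)) +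
                        PySem.List.pyGetD ((List.range (n + 1)).map (pvPsum nums)) (i + l + 1) 0 -
                        PySem.List.pyGetD ((List.range (n + 1)).map (pvPsum nums)) i 0)
                  else
                    pvSet2 dp i (i + l)
                      (max (pvGet2 dp (i + 1) (i + l)) (pvGet2 dp i (i + l - 1)) -
                        PySem.List.pyGetD ((List.range (n + 1)).map (pvPsum nums)) (i + l + 1) 0 +
                        PySem.List.pyGetD ((List.range (n + 1)).map (pvPsum nums)) i 0)
              else dp)
            st.1, !st.2))
      (pvMat n (pvCondIn nums n 0 0), ((n % 2) == 1))
      = (pvMat n (pvCondIn nums n L 0), (((n + L) % 2) == 1)) := by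
  intro L
  induction L with
  | zero =>
    rw [show ((0:Nat):Int) = 0 from rfl, PySem.List.pyRange_one_eq_nil (le_refl 0),
      List.foldl_nil, Nat.add_zero]
  | succ L ih =>
    rw [show ((L+1:Nat):Int) = ((L:Int)) + 1 by push_cast; ring,
        PySem.List.pyRange_one_succ_right (a := 0) (b := (L:Int)) (by omega),
        List.foldl_append, ih]
    simp only [List.foldl_cons, List.foldl_nil]
    have hstep := pv_inner nums n hn L ((n + L) % 2 == 1) rfl (n + 1) (le_refl _)
    rw [show ((n:Int) + 1) = ((n+1 : Nat) : Int) by push_cast; ring]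
    rw [hstep]
    rw [show pvMat n (pvCondIn nums n L (n+1)) = pvMat n (pvCondIn nums n (L+1) 0) from
      pvMat_congr _ _ _ (by
        intro i j hi hj
        unfold pvCondIn
        by_cases hc : j < n ∧ i ≤ j ∧ (j - i < L ∨ (j - i = L ∧ i < n + 1))
        · rw [if_pos hc, if_pos (by omega)]
        · rw [if_neg hc, if_neg (by omega)])]
    rw [pv_parity_flip (n + L)]
    rfl

theorem pv_A_eq (nums : List Int) (h : nums ≠ []) :
    getMaximumScore nums = pvG nums nums.length 0 (nums.length - 1) := by
  have hn : nums.length ≠ 0 := by simpa using h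
  simp only [getMaximumScore]
  rw [pv_preA, pv_parity_init, pv_dp0 nums nums.length]
  have hO := pv_outer nums nums.length rfl (nums.length + 1)
  rw [show ((nums.length + 1 : Nat) : Int) = ((nums.length:Int) + 1) by push_cast; ring] at hO
  rw [hO]
  rw [show ((nums.length:Int) - 1) = ((nums.length - 1 : Nat) : Int) by omega,
      show ((0:Int)) = ((0:Nat):Int) from rfl]
  rw [pvGet2_mat nums.length _ 0 (nums.length - 1) (by omega) (by omega)]
  unfold pvCondIn
  rw [if_pos (by omega), Nat.sub_zero]

-- ===== VERDICT (by name: the statement is the Claim_ definition above) =====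
theorem getMaximumScore_spec : Claim_equal_getMaximumScore := by
  intro nums _
  show getMaximumScore nums = getMaximumScore_alt nums
  by_cases h : nums = []
  · subst h; decide
  · rw [pv_A_eq nums h, pv_alt_eq nums h]
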